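-- pv_equiv track=rewrite | github.com/gralbert/Markov-chains | main.py | dict_of_links
-- ===== SOURCE A (Python) =====
-- def dict_of_links(text_list):
--     """ Makes dictionary of links from list. """
--     _dict = {}
--     links = []
--     for i in range(len(text_list)-1):
--         if text_list[i] not in _dict:
--             for j in range(len(text_list)-1):
--                 if text_list[i] == text_list[j]:
--                     links.append(text_list[j+1])
--             _dict.update({text_list[i]: links})
--         links = []
--     _dict.update({text_list[len(text_list) - 1]: []})
--     return _dict
-- ===== SOURCE B (Python) =====
-- def dict_of_links(text_list):
--     """ Makes dictionary of links from list. """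
--     _dict = {}
--     for cur, nxt in zip(text_list, text_list[1:]):
--         _dict.setdefault(cur, []).append(nxt)
--     _dict[text_list[-1]] = []
--     return _dict
-- ===== Notes on version B (the rewrite author's own statement) =====
-- stated objective: faster
-- what changed: A rescans the whole list for every newly seen word (nested index loops); B makes one pass over adjacent word pairs, appending each successor to the word's dict entry via setdefault, then sets the last word's entry to [].
-- outside the precondition, e.g. on dict_of_links([]): A raises IndexError, B raises IndexError
import Mathlib
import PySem

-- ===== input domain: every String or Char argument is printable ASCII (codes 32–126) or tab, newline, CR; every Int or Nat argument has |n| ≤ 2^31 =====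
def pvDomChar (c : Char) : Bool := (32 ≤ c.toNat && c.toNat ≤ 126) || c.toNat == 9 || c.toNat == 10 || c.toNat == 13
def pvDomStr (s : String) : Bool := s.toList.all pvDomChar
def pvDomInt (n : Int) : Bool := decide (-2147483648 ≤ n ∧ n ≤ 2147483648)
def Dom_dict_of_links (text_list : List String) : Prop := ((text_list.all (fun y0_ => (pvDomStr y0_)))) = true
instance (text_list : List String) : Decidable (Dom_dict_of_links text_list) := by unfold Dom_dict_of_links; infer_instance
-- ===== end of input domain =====

-- B replaces A's quadratic rescan (for each new word, a full inner pass collecting its successors)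
-- by a single pass over adjacent word pairs appending each successor to the word's dict entry; asymptotically faster.

-- ===== PORT A =====
def dict_of_links (text_list : List String) : List (String × List String) :=
  (((PySem.List.pyRange 0 ((text_list.length : Int) - 1) 1).foldl (fun _dict i =>
      if _dict.contains (PySem.List.pyGetD text_list i "") then _dict
      else
        _dict.insert (PySem.List.pyGetD text_list i "")
          ((PySem.List.pyRange 0 ((text_list.length : Int) - 1) 1).foldl (fun links j =>
            if PySem.List.pyGetD text_list j "" == PySem.List.pyGetD text_list i "" then
              links ++ [PySem.List.pyGetD text_list (j + 1) ""]
            else links) ([] : List String))) PySem.Dict.empty).insert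
    (PySem.List.pyGetD text_list ((text_list.length : Int) - 1) "") []).items

-- ===== PORT B =====
def dict_of_links_alt (text_list : List String) : List (String × List String) :=
  (((text_list.zip (PySem.List.slice text_list (some 1) none)).foldl
      (fun _dict p => _dict.modify p.1 [] (fun l => l ++ [p.2])) PySem.Dict.empty).insert
    (PySem.List.pyGetD text_list (-1) "") []).items

-- ===== PRECONDITION & SPEC =====
-- Pre_ excludes only the empty list, on which the Python A raises IndexError (text_list[-1]).
def Pre_dict_of_links (text_list : List String) : Prop := text_list ≠ []
instance (text_list : List String) : Decidable (Pre_dict_of_links text_list) := by unfold Pre_dict_of_links; infer_instance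
def pvWitness_dict_of_links : List String := ["a", "b", "a", "c"]

def Spec_dict_of_links (text_list : List String) (out : List (String × List String)) : Prop := out = dict_of_links_alt text_list
instance (text_list : List String) (out : List (String × List String)) : Decidable (Spec_dict_of_links text_list out) := by unfold Spec_dict_of_links; infer_instance

-- ===== CLAIM (what is proved, stated in full; the proofs are below) =====
def Claim_equal_dict_of_links : Prop := ∀ (text_list : List String), Dom_dict_of_links text_list → Pre_dict_of_links text_list → Spec_dict_of_links text_list (dict_of_links text_list)

-- ===== LEMMAS AND PROOFS =====

-- successor list of a word, read off the adjacent-pair list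
def pvSucc (pairs : List (String × String)) (w : String) : List String :=
  (pairs.filter (fun p => p.1 == w)).map (fun p => p.2)

-- A's outer loop (skip-if-present insert of a key-determined value) builds the first-occurrence dict
lemma foldA_items (v : String → List String) (ws ks : List String) (hnd : ks.Nodup) :
    (ws.foldl (fun d w => if d.contains w then d else d.insert w (v w))
        (⟨ks.map (fun w => (w, v w))⟩ : PySem.Dict String (List String))).items
      = (PySem.Set.update ks ws).map (fun w => (w, v w)) := by
  induction ws generalizing ks with
  | nil => simp [PySem.Set.update]
  | cons w ws ih =>
    by_cases hw : w ∈ ks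
    · have hc : (⟨ks.map (fun w => (w, v w))⟩ : PySem.Dict String (List String)).contains w = true := by
        simp [PySem.Dict.contains_mk, List.any_map, Function.comp]
        exact hw
      have hadd : PySem.Set.add ks w = ks := by
        simp [PySem.Set.add, PySem.Set.contains, hw]
      simp only [List.foldl_cons, hc, if_true, PySem.Set.update, hadd]
      simpa [PySem.Set.update] using ih ks hnd
    · have hc : (⟨ks.map (fun w => (w, v w))⟩ : PySem.Dict String (List String)).contains w = false := by
        simp [PySem.Dict.contains_mk, List.any_map, Function.comp]
        exact fun a ha h => hw (h ▸ ha)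
      have hins : ((⟨ks.map (fun w => (w, v w))⟩ : PySem.Dict String (List String)).insert w (v w))
          = (⟨(ks ++ [w]).map (fun w => (w, v w))⟩ : PySem.Dict String (List String)) := by
        apply PySem.Dict.ext
        simp [PySem.Dict.items_insert_of_not_contains _ _ hc]
      have hadd : PySem.Set.add ks w = ks ++ [w] := by
        simp [PySem.Set.add, PySem.Set.contains, hw]
      simp only [List.foldl_cons, hc, Bool.false_eq_true, if_false, hins,
        PySem.Set.update, hadd]
      simpa [PySem.Set.update] using ih (ks ++ [w]) (by simp [List.nodup_append, hnd]; exact fun a ha h => hw (h ▸ ha))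

lemma foldA_items_empty (v : String → List String) (ws : List String) :
    (ws.foldl (fun d w => if d.contains w then d else d.insert w (v w))
        (PySem.Dict.empty : PySem.Dict String (List String))).items
      = (PySem.Set.ofList ws).map (fun w => (w, v w)) :=
  foldA_items v ws [] List.nodup_nil

-- B's loop builds the same items list
lemma foldB_items (pairs : List (String × String)) :
    ((pairs.foldl (fun d p => d.modify p.1 [] (fun l => l ++ [p.2]))
        (PySem.Dict.empty : PySem.Dict String (List String)))).items
      = (PySem.Set.ofList (pairs.map Prod.fst)).map (fun w => (w, pvSucc pairs w)) := by
  have hnd : ((pairs.foldl (fun d p => d.modify p.1 [] (fun l => l ++ [p.2]))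
      (PySem.Dict.empty : PySem.Dict String (List String)))).keys.Nodup :=
    PySem.Dict.nodup_keys_foldl_modify_key pairs Prod.fst [] (fun _ p => (fun l => l ++ [p.2])) _
      (by simp [PySem.Dict.keys_empty])
  rw [PySem.Dict.items_eq_map_keys _ hnd []]
  rw [PySem.Dict.keys_foldl_modify_key pairs Prod.fst [] (fun _ p => (fun l => l ++ [p.2]))]
  have hkeys : PySem.Set.update (PySem.Dict.empty : PySem.Dict String (List String)).keys (pairs.map Prod.fst)
      = PySem.Set.ofList (pairs.map Prod.fst) := by
    simp [PySem.Set.update, PySem.Set.ofList, PySem.Dict.keys_empty, PySem.Set.empty]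
  rw [hkeys]
  apply List.map_congr_left
  intro w _
  rw [PySem.Dict.getD_foldl_modify_append]
  simp [pvSucc, PySem.Dict.getD_empty]

-- ===== VERDICT (by name: the statement is the Claim_ definition above) =====
theorem dict_of_links_spec : Claim_equal_dict_of_links := by
  intro tl _ hpre
  unfold Spec_dict_of_links dict_of_links dict_of_links_alt
  rw [PySem.List.slice_from_one]
  have hlen1 : 1 ≤ tl.length := List.length_pos_iff.mpr hpre
  have hplen : (tl.zip tl.tail).length = tl.length - 1 := by
    simp [List.length_zip, List.length_tail]
  have hcast : (tl.length : Int) - 1 = ((tl.zip tl.tail).length : Int) := by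
    rw [hplen]; omega
  have hget : ∀ j : Int, 0 ≤ j → j < ((tl.zip tl.tail).length : Int) →
      PySem.List.pyGetD (tl.zip tl.tail) j ("", "")
        = (PySem.List.pyGetD tl j "", PySem.List.pyGetD tl (j + 1) "") := by
    intro j h0 hj
    have hjn : j.toNat < (tl.zip tl.tail).length := by omega
    have hjt : j.toNat < tl.length := by omega
    have hjt1 : j.toNat + 1 < tl.length := by omega
    rw [PySem.List.pyGetD_eq_getElem (tl.zip tl.tail) ("", "") h0 (by exact_mod_cast hj),
        PySem.List.pyGetD_eq_getElem tl "" h0 (by omega),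
        PySem.List.pyGetD_eq_getElem tl "" (by omega) (by omega)]
    have ht : (j + 1).toNat = j.toNat + 1 := by omega
    simp [ht, List.getElem_zip, List.getElem_tail]
  -- A's quadratic index loops equal the single pair-pass, item for item
  have hA : ((PySem.List.pyRange 0 ((tl.length : Int) - 1) 1).foldl (fun _dict i =>
      if _dict.contains (PySem.List.pyGetD tl i "") then _dict
      else
        _dict.insert (PySem.List.pyGetD tl i "")
          ((PySem.List.pyRange 0 ((tl.length : Int) - 1) 1).foldl (fun links j =>
            if PySem.List.pyGetD tl j "" == PySem.List.pyGetD tl i "" then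
              links ++ [PySem.List.pyGetD tl (j + 1) ""]
            else links) ([] : List String))) PySem.Dict.empty)
      = (tl.zip tl.tail).foldl (fun d p =>
          if d.contains p.1 then d else d.insert p.1 (pvSucc (tl.zip tl.tail) p.1)) PySem.Dict.empty := by
    rw [hcast]
    rw [PySem.List.foldl_congr_mem _ _
      (fun d i => (fun d (p : String × String) =>
        if d.contains p.1 then d else d.insert p.1 (pvSucc (tl.zip tl.tail) p.1)) d
          (PySem.List.pyGetD (tl.zip tl.tail) i ("", ""))) _ ?_]
    · rw [PySem.List.foldl_pyRange_pyGetD' (tl.zip tl.tail) ("", "")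
        (fun d (p : String × String) =>
          if d.contains p.1 then d else d.insert p.1 (pvSucc (tl.zip tl.tail) p.1))
        PySem.Dict.empty le_rfl]
      simp
    · intro d i hi
      rw [PySem.List.mem_pyRange_one] at hi
      have hw := hget i hi.1 hi.2
      have hinner : ((PySem.List.pyRange 0 ((tl.zip tl.tail).length : Int) 1).foldl (fun links j =>
          if PySem.List.pyGetD tl j "" == PySem.List.pyGetD tl i "" then
            links ++ [PySem.List.pyGetD tl (j + 1) ""]
          else links) ([] : List String))
          = pvSucc (tl.zip tl.tail) (PySem.List.pyGetD tl i "") := by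
        rw [PySem.List.foldl_congr_mem _ _
          (fun links j => (fun acc (q : String × String) =>
            if q.1 == PySem.List.pyGetD tl i "" then acc ++ [q.2] else acc) links
              (PySem.List.pyGetD (tl.zip tl.tail) j ("", ""))) _ ?_]
        · rw [PySem.List.foldl_pyRange_pyGetD' (tl.zip tl.tail) ("", "")
            (fun acc (q : String × String) =>
              if q.1 == PySem.List.pyGetD tl i "" then acc ++ [q.2] else acc)
            ([] : List String) le_rfl]
          simp only [Int.toNat_zero, List.drop_zero]
          rw [PySem.List.foldl_append_if]
          simp [pvSucc]
        · intro links j hj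
          rw [PySem.List.mem_pyRange_one] at hj
          simp only [hget j hj.1 hj.2]
      simp only [hinner, hw]
  rw [hA]
  -- both fold results have the same items
  have hitems : ((tl.zip tl.tail).foldl (fun d p =>
        if d.contains p.1 then d else d.insert p.1 (pvSucc (tl.zip tl.tail) p.1)) PySem.Dict.empty)
      = ((tl.zip tl.tail).foldl (fun d p => d.modify p.1 [] (fun l => l ++ [p.2])) PySem.Dict.empty) := by
    apply PySem.Dict.ext
    rw [foldB_items]
    rw [← List.foldl_map (f := Prod.fst) (g := fun d w =>
      if PySem.Dict.contains d w then d else d.insert w (pvSucc (tl.zip tl.tail) w))]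
    exact foldA_items_empty (pvSucc (tl.zip tl.tail)) ((tl.zip tl.tail).map Prod.fst)
  rw [hitems]
  -- the final key: tl[len-1] is tl[-1]
  have hk : PySem.List.pyGetD tl ((tl.length : Int) - 1) "" = PySem.List.pyGetD tl (-1) "" := by
    rw [PySem.List.pyGetD_neg_one tl "" hpre]
    have : (tl.length : Int) - 1 = ((tl.length - 1 : Nat) : Int) := by omega
    rw [this, PySem.List.pyGetD_natCast, List.getLast_eq_getElem,
        List.getD_eq_getElem _ _ (by omega)]
  rw [hk]
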